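-- pv_equiv track=rewrite | github.com/hamdyaea/GNU-Coreutils-Python | factor.py | format_factors
-- ===== SOURCE A (Python) =====
-- def format_factors(factors, exponents=False):
--     """Format factors as 'p^e' or just 'p' depending on the `exponents` flag."""
--     factor_dict = {}
--     for factor in factors:
--         factor_dict[factor] = factor_dict.get(factor, 0) + 1
--
--     result = []
--     for factor, count in sorted(factor_dict.items()):
--         if exponents and count > 1:
--             result.append(f"{factor}^{count}")
--         else:
--             result.append(str(factor))
--
--     return ' '.join(result)
-- ===== SOURCE B (Python) =====
-- def format_factors(factors, exponents=False):
--     """Format factors as 'p^e' or just 'p' depending on the `exponents` flag."""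
--     xs = sorted(factors)
--     n = len(xs)
--     parts = []
--     i = 0
--     while i < n:
--         j = i + 1
--         while j < n and xs[j] == xs[i]:
--             j += 1
--         count = j - i
--         if exponents and count > 1:
--             parts.append(f"{xs[i]}^{count}")
--         else:
--             parts.append(str(xs[i]))
--         i = j
--     return ' '.join(parts)
-- ===== Notes on version B (the rewrite author's own statement) =====
-- stated objective: alternative
-- what changed: B replaces A's frequency-dict-then-sorted-items strategy with sort-then-run-length-scan: it sorts the factors once and consumes maximal runs of equal values, the run length being the exponent, so no dictionary is built.
import Mathlib
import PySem

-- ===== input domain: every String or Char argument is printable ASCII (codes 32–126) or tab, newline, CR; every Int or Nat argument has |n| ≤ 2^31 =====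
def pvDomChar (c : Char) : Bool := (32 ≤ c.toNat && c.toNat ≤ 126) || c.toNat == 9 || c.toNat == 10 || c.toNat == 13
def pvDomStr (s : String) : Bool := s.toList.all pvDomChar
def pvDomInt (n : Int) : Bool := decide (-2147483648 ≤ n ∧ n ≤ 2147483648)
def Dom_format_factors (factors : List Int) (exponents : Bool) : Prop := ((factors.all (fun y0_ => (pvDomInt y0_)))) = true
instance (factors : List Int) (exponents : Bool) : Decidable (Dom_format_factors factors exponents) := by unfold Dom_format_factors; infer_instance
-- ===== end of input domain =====

-- B replaces A's frequency-dict-then-sorted-items strategy with a sort-then-run-length scan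
-- (alternative decomposition, same output; no speed claim).

-- ===== PORT A =====
-- literal port of A: build the count dict, then loop over sorted items appending 'p^e' or 'p'
def format_factors (factors : List Int) (exponents : Bool) : String :=
  let factor_dict := factors.foldl (fun d factor => d.insert factor (d.getD factor 0 + 1))
      (PySem.Dict.empty : PySem.Dict Int Int)
  let result := (PySem.List.sorted2 factor_dict.items (fun p => p.1) (fun p => p.2)).foldl
      (fun acc p =>
        if exponents && decide (p.2 > 1)
        then acc ++ [PySem.Int.toStr p.1 ++ "^" ++ PySem.Int.toStr p.2]
        else acc ++ [PySem.Int.toStr p.1]) []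
  PySem.Str.join " " result

-- ===== PORT B =====
-- the outer while loop of Source B, as recursion on the suffix xs[i:] of the sorted list:
-- the inner 'while xs[j] == xs[i]' scan is the length of the matching prefix of the tail,
-- count = j - i, and the loop continues at the suffix starting at j
def altRun (exponents : Bool) : List Int → List String
  | [] => []
  | x :: rest =>
      let c := (rest.takeWhile (fun y => y == x)).length
      let count : Int := 1 + (c : Int)
      (if exponents && decide (count > 1)
       then PySem.Int.toStr x ++ "^" ++ PySem.Int.toStr count
       else PySem.Int.toStr x) :: altRun exponents (rest.drop c)
  termination_by l => l.length
  decreasing_by simp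

def format_factors_alt (factors : List Int) (exponents : Bool) : String :=
  PySem.Str.join " " (altRun exponents (PySem.List.sorted factors (fun v => v)))

-- ===== PRECONDITION & SPEC =====
def Spec_format_factors (factors : List Int) (exponents : Bool) (out : String) : Prop := out = format_factors_alt factors exponents
instance (factors : List Int) (exponents : Bool) (out : String) : Decidable (Spec_format_factors factors exponents out) := by unfold Spec_format_factors; infer_instance

-- ===== CLAIM (what is proved, stated in full; the proofs are below) =====
def Claim_equal_format_factors : Prop := ∀ (factors : List Int) (exponents : Bool), Dom_format_factors factors exponents → Spec_format_factors factors exponents (format_factors factors exponents)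

-- ===== LEMMAS AND PROOFS =====

-- the formatted part for one (factor, count) pair
def pvFmt (exponents : Bool) (p : Int × Int) : String :=
  if exponents && decide (p.2 > 1)
  then PySem.Int.toStr p.1 ++ "^" ++ PySem.Int.toStr p.2
  else PySem.Int.toStr p.1

-- the (factor, run length) pairs B's scan walks through
def pvGroups : List Int → List (Int × Int)
  | [] => []
  | x :: rest =>
      let c := (rest.takeWhile (fun y => y == x)).length
      (x, 1 + (c : Int)) :: pvGroups (rest.drop c)
  termination_by l => l.length
  decreasing_by simp

-- lexicographic ≤ on Int pairs (Python's tuple order)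
def pvLexLe (a b : Int × Int) : Prop := a.1 < b.1 ∨ (a.1 = b.1 ∧ a.2 ≤ b.2)

lemma pvLexLe_trans {a b c : Int × Int} (h1 : pvLexLe a b) (h2 : pvLexLe b c) : pvLexLe a c := by
  unfold pvLexLe at *; omega

lemma altRun_eq_map (exponents : Bool) (l : List Int) :
    altRun exponents l = (pvGroups l).map (pvFmt exponents) := by
  fun_induction altRun exponents l with
  | case1 => simp [pvGroups]
  | case2 x rest c count ih =>
      rw [pvGroups]
      simp only [List.map_cons]
      exact congrArg₂ _ rfl ih

-- sorted2's insertion step preserves pairwise lexicographic order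
lemma insertBy_lex_pairwise (x : Int × Int) (ys : List (Int × Int))
    (h : ys.Pairwise pvLexLe) :
    (PySem.List.insertBy
      (fun a b => decide (a.1 < b.1) || (!decide (b.1 < a.1) && decide (a.2 < b.2))) x ys).Pairwise pvLexLe := by
  induction ys with
  | nil => simp [PySem.List.insertBy]
  | cons y ys ih =>
      rw [List.pairwise_cons] at h
      rw [PySem.List.insertBy]
      split
      · rename_i hb
        simp only [Bool.or_eq_true, Bool.and_eq_true, decide_eq_true_eq, Bool.not_eq_true',
          decide_eq_false_iff_not] at hb
        have hxy : pvLexLe x y := by unfold pvLexLe; omega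
        refine List.pairwise_cons.mpr ⟨?_, List.pairwise_cons.mpr h⟩
        intro z hz
        rcases List.mem_cons.mp hz with rfl | hz
        · exact hxy
        · exact pvLexLe_trans hxy (h.1 z hz)
      · rename_i hb
        simp only [Bool.or_eq_true, Bool.and_eq_true, decide_eq_true_eq, Bool.not_eq_true',
          decide_eq_false_iff_not, not_or, not_and, not_lt] at hb
        have hyx : pvLexLe y x := by
          unfold pvLexLe
          rcases lt_trichotomy y.1 x.1 with h' | h' | h'
          · omega
          · right; exact ⟨h', by omega⟩
          · omega
        refine List.pairwise_cons.mpr ⟨?_, ih h.2⟩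
        intro z hz
        rcases (PySem.List.mem_insertBy _ _ _ _).mp hz with rfl | hz
        · exact hyx
        · exact h.1 z hz

lemma foldl_insertBy_lex_pairwise (xs : List (Int × Int)) (acc : List (Int × Int))
    (hacc : acc.Pairwise pvLexLe) :
    (xs.foldl (fun acc x => PySem.List.insertBy
      (fun a b => decide (a.1 < b.1) || (!decide (b.1 < a.1) && decide (a.2 < b.2))) x acc) acc).Pairwise pvLexLe := by
  induction xs generalizing acc with
  | nil => exact hacc
  | cons x xs ih => exact ih _ (insertBy_lex_pairwise x acc hacc)

lemma sorted2_lex_pairwise (xs : List (Int × Int)) :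
    (PySem.List.sorted2 xs (fun p => p.1) (fun p => p.2)).Pairwise pvLexLe := by
  have := foldl_insertBy_lex_pairwise xs [] (List.Pairwise.nil)
  simpa [PySem.List.sorted2] using this

lemma drop_takeWhile_len (p : Int → Bool) (l : List Int) :
    l.drop (l.takeWhile p).length = l.dropWhile p := by
  induction l with
  | nil => rfl
  | cons a t ih => by_cases h : p a <;> simp [h, ih]

lemma lt_of_mem_dropWhile (x : Int) (l : List Int) (hp : l.Pairwise (· ≤ ·))
    (hge : ∀ z ∈ l, x ≤ z) :
    ∀ z ∈ l.dropWhile (fun y => y == x), x < z := by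
  induction l with
  | nil => simp
  | cons a t ih =>
      rw [List.pairwise_cons] at hp
      by_cases h : a = x
      · subst h
        simp only [List.dropWhile_cons, beq_self_eq_true, if_true]
        exact ih hp.2 (fun z hz => hge z (List.mem_cons_of_mem _ hz))
      · have hxa : x < a := lt_of_le_of_ne (hge a (List.mem_cons_self)) (fun e => h e.symm)
        rw [List.dropWhile_cons_of_neg (by simp [h])]
        intro z hz
        rcases List.mem_cons.mp hz with rfl | hz
        · exact hxa
        · exact lt_of_lt_of_le hxa (hp.1 z hz)

lemma count_eq_zero_of_gt (x : Int) (l : List Int) (h : ∀ z ∈ l, x < z) : l.count x = 0 :=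
  List.count_eq_zero.mpr (fun hx => lt_irrefl x (h x hx))

-- the three facts about B's run pairs, by one induction along the scan
lemma pvGroups_spec (l : List Int) (hp : l.Pairwise (· ≤ ·)) :
    (∀ p ∈ pvGroups l, p.1 ∈ l ∧ p.2 = (l.count p.1 : Int))
    ∧ (∀ k ∈ l, k ∈ (pvGroups l).map Prod.fst)
    ∧ (pvGroups l).Pairwise (fun a b => a.1 < b.1) := by
  fun_induction pvGroups l with
  | case1 => simp
  | case2 x rest c ih =>
      rw [List.pairwise_cons] at hp
      have hdw : rest.drop c = rest.dropWhile (fun y => y == x) := drop_takeWhile_len _ _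
      have hm_pair : (rest.drop c).Pairwise (· ≤ ·) := by
        rw [hdw]; exact hp.2.sublist (List.dropWhile_sublist _)
      have hm_lt : ∀ z ∈ rest.drop c, x < z := by
        rw [hdw]; exact lt_of_mem_dropWhile x rest hp.2 hp.1
      obtain ⟨ih1, ih2, ih3⟩ := ih hm_pair
      have hsplit : rest = rest.takeWhile (fun y => y == x) ++ rest.drop c := by
        rw [hdw]; exact (List.takeWhile_append_dropWhile).symm
      have htake : ∀ z ∈ rest.takeWhile (fun y => y == x), z = x := by
        intro z hz
        have := List.mem_takeWhile_imp hz
        simpa using this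
      have hcount_take : (rest.takeWhile (fun y => y == x)).count x
          = (rest.takeWhile (fun y => y == x)).length := by
        apply List.count_eq_length.mpr
        intro b hb; exact ((htake b hb).symm ▸ rfl)
      have hcount_m : (rest.drop c).count x = 0 := count_eq_zero_of_gt x _ hm_lt
      have hcx : (x :: rest).count x = 1 + c := by
        rw [List.count_cons_self]
        conv_lhs => rw [hsplit]
        rw [List.count_append, hcount_take, hcount_m]
        omega
      refine ⟨?_, ?_, ?_⟩
      · intro p hpmem
        rcases List.mem_cons.mp hpmem with rfl | hpmem
        · exact ⟨List.mem_cons_self, by simp [hcx]⟩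
        · obtain ⟨h1, h2⟩ := ih1 p hpmem
          have hne : p.1 ≠ x := fun e => absurd (hm_lt p.1 h1) (by omega)
          have h0 : (rest.takeWhile (fun y => y == x)).count p.1 = 0 :=
            List.count_eq_zero.mpr (fun hx => hne (htake _ hx))
          have hcnt : (x :: rest).count p.1 = (rest.drop c).count p.1 := by
            conv_lhs => rw [hsplit]
            have hne' : ¬ x = p.1 := fun e => hne e.symm
            simp [List.count_append, h0, hne']
          refine ⟨List.mem_cons_of_mem _ (hsplit ▸ List.mem_append_right _ h1), ?_⟩
          rw [hcnt]; exact h2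
      · intro k hk
        rcases List.mem_cons.mp hk with rfl | hk
        · simp
        · by_cases hkx : k = x
          · subst hkx; simp
          · have hkm : k ∈ rest.drop c := by
              conv at hk => rw [hsplit]
              rcases List.mem_append.mp hk with h' | h'
              · exact absurd (htake k h') hkx
              · exact h'
            simp only [List.map_cons, List.mem_cons]
            exact Or.inr (ih2 k hkm)
      · refine List.pairwise_cons.mpr ⟨?_, ih3⟩
        intro p hpmem
        exact hm_lt p.1 (ih1 p hpmem).1

-- the pair lists of the two ports coincide
lemma pairs_eq (factors : List Int) :
    PySem.List.sorted2 (PySem.Dict.counter factors).items (fun p => p.1) (fun p => p.2)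
      = pvGroups (PySem.List.sorted factors (fun v => v)) := by
  set l := PySem.List.sorted factors (fun v => v) with hl
  have hlp : l.Pairwise (· ≤ ·) := PySem.List.sorted_pairwise factors (fun v => v)
  have hlperm : l.Perm factors := PySem.List.sorted_perm factors (fun v => v) false
  obtain ⟨g1, g2, g3⟩ := pvGroups_spec l hlp
  have hitems : (PySem.Dict.counter factors).items
      = (PySem.Set.ofList factors).map (fun k => (k, (factors.count k : Int))) :=
    PySem.Dict.items_counter factors
  -- the run pairs are (as a set) exactly the counter's items
  have hnd_items : ((PySem.Set.ofList factors).map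
      (fun k => (k, (factors.count k : Int)))).Nodup :=
    (PySem.Set.nodup_ofList factors).map (fun a b e => (Prod.mk.injEq _ _ _ _ ▸ e).1)
  have hnd_groups : (pvGroups l).Nodup :=
    g3.imp (fun {a b} h => fun e => by rw [e] at h; exact lt_irrefl _ h)
  have hperm : (pvGroups l).Perm
      ((PySem.Set.ofList factors).map (fun k => (k, (factors.count k : Int)))) := by
    rw [List.perm_ext_iff_of_nodup hnd_groups hnd_items]
    intro p
    constructor
    · intro hp
      obtain ⟨h1, h2⟩ := g1 p hp
      have hx : p.1 ∈ factors := hlperm.mem_iff.mp h1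
      have hc : l.count p.1 = factors.count p.1 := hlperm.count_eq p.1
      rw [List.mem_map]
      refine ⟨p.1, (PySem.Set.mem_ofList _ _).mpr hx, ?_⟩
      rw [← hc, ← h2]
    · intro hp
      rw [List.mem_map] at hp
      obtain ⟨k, hk, rfl⟩ := hp
      have hkf : k ∈ factors := (PySem.Set.mem_ofList _ _).mp hk
      have hkl : k ∈ l := hlperm.mem_iff.mpr hkf
      have := g2 k hkl
      rw [List.mem_map] at this
      obtain ⟨q, hq, hq1⟩ := this
      have := g1 q hq
      have hqe : q = (k, (factors.count k : Int)) := by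
        have hc : l.count k = factors.count k := hlperm.count_eq k
        have : q.2 = (factors.count k : Int) := by rw [this.2, hq1, hc]
        exact Prod.ext hq1 this
      rw [← hqe]; exact hq
  -- both lists are sorted in the same (antisymmetric) lexicographic order
  have hsorted_lhs := sorted2_lex_pairwise (PySem.Dict.counter factors).items
  have hsorted_rhs : (pvGroups l).Pairwise pvLexLe :=
    g3.imp (fun {a b} h => Or.inl h)
  have hperm_lhs : (PySem.List.sorted2 (PySem.Dict.counter factors).items
      (fun p => p.1) (fun p => p.2)).Perm (pvGroups l) := by
    refine ((PySem.List.sorted2_perm _ _ _ false).trans ?_)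
    rw [hitems]
    exact hperm.symm
  exact List.Perm.eq_of_pairwise
    (fun a b _ _ h1 h2 => by
      unfold pvLexLe at h1 h2
      have : a.1 = b.1 ∧ a.2 = b.2 := by omega
      exact Prod.ext this.1 this.2)
    hsorted_lhs hsorted_rhs hperm_lhs

-- ===== VERDICT (by name: the statement is the Claim_ definition above) =====
theorem format_factors_spec : Claim_equal_format_factors := by
  intro factors exponents _
  unfold Spec_format_factors format_factors format_factors_alt
  simp only []
  rw [PySem.Dict.foldl_insert_getD_add_one_eq_counter]
  rw [altRun_eq_map, ← pairs_eq]
  congr 1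
  have hbody : ∀ (acc : List String) (p : Int × Int),
      (if exponents && decide (p.2 > 1)
       then acc ++ [PySem.Int.toStr p.1 ++ "^" ++ PySem.Int.toStr p.2]
       else acc ++ [PySem.Int.toStr p.1]) = acc ++ [pvFmt exponents p] := by
    intro acc p
    unfold pvFmt
    split <;> rfl
  calc (PySem.List.sorted2 (PySem.Dict.counter factors).items
          (fun p => p.1) (fun p => p.2)).foldl
        (fun acc p =>
          if exponents && decide (p.2 > 1)
          then acc ++ [PySem.Int.toStr p.1 ++ "^" ++ PySem.Int.toStr p.2]
          else acc ++ [PySem.Int.toStr p.1]) []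
      = (PySem.List.sorted2 (PySem.Dict.counter factors).items
          (fun p => p.1) (fun p => p.2)).foldl
        (fun acc p => acc ++ [pvFmt exponents p]) [] := by
        exact PySem.List.foldl_congr_mem _ _ _ _ (fun acc x _ => hbody acc x)
    _ = (PySem.List.sorted2 (PySem.Dict.counter factors).items
          (fun p => p.1) (fun p => p.2)).map (pvFmt exponents) := by
        rw [PySem.List.foldl_append_singleton_eq_map]
        simp
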